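-- pv_equiv track=rewrite | github.com/13l1NOV/AIProductOwner | Net/actor.py | fitness_similarity_check
-- ===== SOURCE A (Python) =====
-- def fitness_similarity_check(max_fitness, number_of_similarity):  # критерий прекращения
--     result = False
--     similarity = 0
--     for n in range(len(max_fitness) - 1):
--         if max_fitness[n] == max_fitness[n + 1]:
--             similarity += 1
--         else:
--             similarity = 0
--     if similarity == number_of_similarity - 1:
--         result = True
--     return result
-- ===== SOURCE B (Python) =====
-- def fitness_similarity_check(max_fitness, number_of_similarity):
--     # Walk backwards from the end and stop at the first unequal neighbour:
--     # the distance walked is the length of the trailing run of equal pairs.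
--     i = len(max_fitness) - 1
--     while i > 0 and max_fitness[i] == max_fitness[i - 1]:
--         i -= 1
--     return len(max_fitness) - 1 - i == number_of_similarity - 1
-- ===== Notes on version B (the rewrite author's own statement) =====
-- stated objective: alternative
-- what changed: Replaces A's full forward scan with a reset counter by a backward walk from the end that stops at the first unequal neighbour, measuring the trailing equal run directly.
import Mathlib
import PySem

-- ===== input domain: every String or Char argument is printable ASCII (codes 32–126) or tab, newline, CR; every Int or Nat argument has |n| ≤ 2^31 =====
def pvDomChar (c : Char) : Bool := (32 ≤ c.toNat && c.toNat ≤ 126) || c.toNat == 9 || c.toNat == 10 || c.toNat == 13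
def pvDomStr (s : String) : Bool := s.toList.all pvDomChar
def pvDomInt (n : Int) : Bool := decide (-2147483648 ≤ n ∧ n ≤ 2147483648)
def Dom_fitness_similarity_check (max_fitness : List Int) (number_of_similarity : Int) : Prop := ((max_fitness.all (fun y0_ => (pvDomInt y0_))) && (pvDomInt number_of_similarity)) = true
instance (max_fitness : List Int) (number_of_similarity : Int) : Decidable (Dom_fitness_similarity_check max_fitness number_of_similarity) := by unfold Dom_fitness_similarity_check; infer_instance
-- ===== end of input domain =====

-- B replaces A's full forward scan (reset counter) by a backward walk from the
-- end that stops at the first unequal neighbour (objective: alternative; early exit).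

-- ===== PORT A =====
-- forward scan over range(len-1), counter resets on an unequal pair
def fitness_similarity_check (max_fitness : List Int) (number_of_similarity : Int) : Bool :=
  let similarity : Int :=
    (PySem.List.pyRange 0 ((max_fitness.length : Int) - 1) 1).foldl
      (fun s n =>
        if PySem.List.pyGetD max_fitness n 0 = PySem.List.pyGetD max_fitness (n + 1) 0
        then s + 1 else 0) 0
  if similarity = number_of_similarity - 1 then true else false

-- ===== PORT B =====
-- the while loop of Source B: walk i downwards while the neighbour below is equal
def altLoop (xs : List Int) (i : Int) : Int :=
  if h : 0 < i ∧ PySem.List.pyGet? xs i = PySem.List.pyGet? xs (i - 1) then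
    altLoop xs (i - 1)
  else i
termination_by i.toNat
decreasing_by omega

def fitness_similarity_check_alt (max_fitness : List Int) (number_of_similarity : Int) : Bool :=
  let i := altLoop max_fitness ((max_fitness.length : Int) - 1)
  decide ((max_fitness.length : Int) - 1 - i = number_of_similarity - 1)

-- ===== PRECONDITION & SPEC =====
def Spec_fitness_similarity_check (max_fitness : List Int) (number_of_similarity : Int) (out : Bool) : Prop := out = fitness_similarity_check_alt max_fitness number_of_similarity
instance (max_fitness : List Int) (number_of_similarity : Int) (out : Bool) : Decidable (Spec_fitness_similarity_check max_fitness number_of_similarity out) := by unfold Spec_fitness_similarity_check; infer_instance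

-- ===== CLAIM (what is proved, stated in full; the proofs are below) =====
def Claim_equal_fitness_similarity_check : Prop := ∀ (max_fitness : List Int) (number_of_similarity : Int), Dom_fitness_similarity_check max_fitness number_of_similarity → Spec_fitness_similarity_check max_fitness number_of_similarity (fitness_similarity_check max_fitness number_of_similarity)

-- ===== LEMMAS AND PROOFS =====

theorem altLoop_stop (xs : List Int) (i : Int)
    (h : ¬ (0 < i ∧ PySem.List.pyGet? xs i = PySem.List.pyGet? xs (i - 1))) :
    altLoop xs i = i := by
  rw [altLoop]; exact dif_neg h

theorem altLoop_go (xs : List Int) (i : Int)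
    (h : 0 < i ∧ PySem.List.pyGet? xs i = PySem.List.pyGet? xs (i - 1)) :
    altLoop xs i = altLoop xs (i - 1) := by
  rw [altLoop]; exact dif_pos h

theorem pyGet?_append_left_int (xs : List Int) (y : Int) (i : Int)
    (h0 : 0 ≤ i) (h : i < (xs.length : Int)) :
    PySem.List.pyGet? (xs ++ [y]) i = PySem.List.pyGet? xs i := by
  rw [PySem.List.pyGet?_of_nonneg _ h0, PySem.List.pyGet?_of_nonneg _ h0]
  exact List.getElem?_append_left (by omega)

theorem altLoop_append (xs : List Int) (y : Int) :
    ∀ (n : Nat) (i : Int), i.toNat = n → i ≤ (xs.length : Int) - 1 →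
      altLoop (xs ++ [y]) i = altLoop xs i := by
  intro n
  induction n with
  | zero =>
    intro i hn hle
    have hi : ¬ 0 < i := by omega
    rw [altLoop_stop _ _ (by tauto), altLoop_stop _ _ (by tauto)]
  | succ m ih =>
    intro i hn hle
    have hi : 0 < i := by omega
    have hlt : i < (xs.length : Int) := by omega
    have hg1 := pyGet?_append_left_int xs y i (by omega) hlt
    have hg2 := pyGet?_append_left_int xs y (i - 1) (by omega) (by omega)
    by_cases hc : 0 < i ∧ PySem.List.pyGet? xs i = PySem.List.pyGet? xs (i - 1)
    · rw [altLoop_go _ _ (by rw [hg1, hg2]; exact hc), altLoop_go _ _ hc]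
      exact ih (i - 1) (by omega) (by omega)
    · rw [altLoop_stop _ _ (by rw [hg1, hg2]; exact hc), altLoop_stop _ _ hc]

theorem loop_eq (xs : List Int) :
    (PySem.List.pyRange 0 ((xs.length : Int) - 1) 1).foldl
      (fun s n =>
        if PySem.List.pyGetD xs n 0 = PySem.List.pyGetD xs (n + 1) 0
        then s + 1 else (0 : Int)) 0
    = (xs.length : Int) - 1 - altLoop xs ((xs.length : Int) - 1) := by
  induction xs using List.reverseRecOn with
  | nil =>
    rw [PySem.List.pyRange_one_eq_nil (by simp)]
    rw [altLoop_stop _ _ (by rintro ⟨h1, -⟩; simp only [List.length_nil] at h1; omega)]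
    norm_num
  | append_singleton xs y ih =>
    by_cases hx : xs = []
    · subst hx
      simp only [List.nil_append]
      rw [show ((([y] : List Int).length : Int) - 1) = 0 by simp]
      rw [PySem.List.pyRange_one_eq_nil (by omega)]
      rw [altLoop_stop _ _ (by rintro ⟨h1, -⟩; omega)]
      norm_num
    · have hL : 1 ≤ xs.length := List.length_pos_iff.mpr hx
      have hlen : ((xs ++ [y]).length : Int) = (xs.length : Int) + 1 := by simp
      rw [hlen]
      have hrange : PySem.List.pyRange 0 ((xs.length : Int) + 1 - 1)
          = PySem.List.pyRange 0 ((xs.length : Int) - 1) ++ [(xs.length : Int) - 1] := by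
        have he : ((xs.length : Int) + 1 - 1) = ((xs.length : Int) - 1) + 1 := by ring
        rw [he, PySem.List.pyRange_one_succ_right (by omega)]
      rw [hrange, List.foldl_append]
      -- the prefix of the fold only reads indices < xs.length, so the ++ [y] is invisible
      have hpref :
          (PySem.List.pyRange 0 ((xs.length : Int) - 1)).foldl
            (fun s n =>
              if PySem.List.pyGetD (xs ++ [y]) n 0 = PySem.List.pyGetD (xs ++ [y]) (n + 1) 0
              then s + 1 else (0 : Int)) 0
          = (PySem.List.pyRange 0 ((xs.length : Int) - 1)).foldl
            (fun s n =>
              if PySem.List.pyGetD xs n 0 = PySem.List.pyGetD xs (n + 1) 0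
              then s + 1 else (0 : Int)) 0 := by
        apply PySem.List.foldl_congr_mem
        intro s n hn
        rw [PySem.List.mem_pyRange_one] at hn
        have h1 : PySem.List.pyGetD (xs ++ [y]) n 0 = PySem.List.pyGetD xs n 0 := by
          rw [PySem.List.pyGetD_eq_getElem _ _ (by omega) (by simp only [List.length_append, List.length_cons, List.length_nil]; omega),
              PySem.List.pyGetD_eq_getElem _ _ (by omega) (by omega)]
          exact List.getElem_append_left (by omega)
        have h2 : PySem.List.pyGetD (xs ++ [y]) (n + 1) 0 = PySem.List.pyGetD xs (n + 1) 0 := by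
          rw [PySem.List.pyGetD_eq_getElem _ _ (by omega) (by simp only [List.length_append, List.length_cons, List.length_nil]; omega),
              PySem.List.pyGetD_eq_getElem _ _ (by omega) (by omega)]
          exact List.getElem_append_left (by omega)
        rw [h1, h2]
      rw [hpref, ih]
      -- the last fold step and the first altLoop step both look at the pair (xs[len-1], y)
      have hidx : ((xs.length : Int) - 1).toNat = xs.length - 1 := by omega
      have hgetLast : PySem.List.pyGetD (xs ++ [y]) ((xs.length : Int) - 1) 0
          = xs[xs.length - 1]'(by omega) := by
        rw [PySem.List.pyGetD_eq_getElem _ _ (by omega) (by simp only [List.length_append, List.length_cons, List.length_nil]; omega)]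
        simp only [hidx]
        exact List.getElem_append_left (by omega)
      have hgetY : PySem.List.pyGetD (xs ++ [y]) ((xs.length : Int) - 1 + 1) 0 = y := by
        have he : (xs.length : Int) - 1 + 1 = (xs.length : Int) := by ring
        rw [he, PySem.List.pyGetD_eq_getElem _ _ (by omega)
          (by simp only [List.length_append, List.length_cons, List.length_nil]; omega)]
        simp
      have haltget1 : PySem.List.pyGet? (xs ++ [y]) ((xs.length : Int) + 1 - 1)
          = some y := by
        have he : (xs.length : Int) + 1 - 1 = (xs.length : Int) := by ring
        rw [he, PySem.List.pyGet?_of_nonneg _ (by omega)]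
        simp
      have haltget2 : PySem.List.pyGet? (xs ++ [y]) ((xs.length : Int) + 1 - 1 - 1)
          = some (xs[xs.length - 1]'(by omega)) := by
        have he : (xs.length : Int) + 1 - 1 - 1 = (xs.length : Int) - 1 := by ring
        rw [he, PySem.List.pyGet?_of_nonneg _ (by omega)]
        rw [List.getElem?_append_left (by omega)]
        simp only [hidx]
        rw [List.getElem?_eq_getElem (by omega)]
      by_cases hpair : xs[xs.length - 1]'(by omega) = y
      · rw [altLoop_go (xs ++ [y]) ((xs.length : Int) + 1 - 1)
          ⟨by omega, by rw [haltget1, haltget2, hpair]⟩]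
        have he : (xs.length : Int) + 1 - 1 - 1 = (xs.length : Int) - 1 := by ring
        rw [he, altLoop_append xs y ((xs.length : Int) - 1).toNat _ rfl (by omega)]
        simp only [List.foldl_cons, List.foldl_nil]
        rw [if_pos (by rw [hgetLast, hgetY, hpair])]
        ring
      · rw [altLoop_stop (xs ++ [y]) ((xs.length : Int) + 1 - 1) (by
          rintro ⟨-, hc⟩
          rw [haltget1, haltget2] at hc
          exact hpair (Option.some_injective _ hc).symm)]
        simp only [List.foldl_cons, List.foldl_nil]
        rw [if_neg (by rw [hgetLast, hgetY]; exact hpair)]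
        ring

-- ===== VERDICT (by name: the statement is the Claim_ definition above) =====
theorem fitness_similarity_check_spec : Claim_equal_fitness_similarity_check := by
  intro xs k _
  show _ = _
  unfold fitness_similarity_check fitness_similarity_check_alt
  simp only [loop_eq]
  by_cases h : (xs.length : Int) - 1 - altLoop xs ((xs.length : Int) - 1) = k - 1 <;>
    simp [h]
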